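-- pv_equiv track=rewrite | github.com/Akkadian-delphi/sonicus | backend/app/core/auth_transition.py | _determine_role_from_groups
-- ===== SOURCE A (Python) =====
-- def _determine_role_from_groups(groups: list) -> str:
--     """Map Authentik groups to Sonicus roles"""
--     group_role_mapping = {
--         "sonicus-super-admin": "super_admin",
--         "sonicus-business-admin": "business_admin",
--         "sonicus-staff": "staff",
--         "sonicus-user": "user"
--     }
--
--     # Check groups in order of priority (highest to lowest)
--     for group in ["sonicus-super-admin", "sonicus-business-admin", "sonicus-staff", "sonicus-user"]:
--         if group in groups:
--             return group_role_mapping[group]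
--
--     return "user"  # Default role
-- ===== SOURCE B (Python) =====
-- def _determine_role_from_groups(groups: list) -> str:
--     """Map Authentik groups to Sonicus roles (single pass over groups tracking the best rank)"""
--     rank = {
--         "sonicus-super-admin": 0,
--         "sonicus-business-admin": 1,
--         "sonicus-staff": 2,
--         "sonicus-user": 3,
--     }
--     best = 4
--     for g in groups:
--         best = min(best, rank.get(g, 4))
--     if best == 0:
--         return "super_admin"
--     if best == 1:
--         return "business_admin"
--     if best == 2:
--         return "staff"
--     return "user"
-- ===== Notes on version B (the rewrite author's own statement) =====
-- stated objective: alternative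
-- what changed: Replaces A's four membership scans over the input (one per priority group) with a single pass over `groups` maintaining a running minimum rank, mapped to a role at the end.
import Mathlib
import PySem

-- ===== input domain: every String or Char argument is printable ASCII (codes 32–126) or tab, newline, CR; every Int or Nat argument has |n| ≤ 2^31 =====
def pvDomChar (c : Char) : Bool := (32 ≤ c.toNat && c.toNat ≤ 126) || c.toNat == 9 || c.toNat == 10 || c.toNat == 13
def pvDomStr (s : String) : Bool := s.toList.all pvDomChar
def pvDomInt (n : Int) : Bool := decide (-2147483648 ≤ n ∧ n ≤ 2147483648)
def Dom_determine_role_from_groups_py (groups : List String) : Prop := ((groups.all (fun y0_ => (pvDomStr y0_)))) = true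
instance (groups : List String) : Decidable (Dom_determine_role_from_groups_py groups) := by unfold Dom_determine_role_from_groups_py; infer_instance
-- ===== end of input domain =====

-- ===== PORT A =====
-- A loops over the fixed priority list and returns the mapped role for the first
-- group found in `groups`; transliterated as the unrolled chain of membership tests.
def determine_role_from_groups_py (groups : List String) : String :=
  if "sonicus-super-admin" ∈ groups then "super_admin"
  else if "sonicus-business-admin" ∈ groups then "business_admin"
  else if "sonicus-staff" ∈ groups then "staff"
  else if "sonicus-user" ∈ groups then "user"
  else "user"

-- ===== PORT B =====
-- rank.get(g, 4) of Source B
def pvRank (g : String) : Nat :=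
  if g = "sonicus-super-admin" then 0
  else if g = "sonicus-business-admin" then 1
  else if g = "sonicus-staff" then 2
  else if g = "sonicus-user" then 3
  else 4

def determine_role_from_groups_py_alt (groups : List String) : String :=
  let best := groups.foldl (fun b g => min b (pvRank g)) 4
  if best = 0 then "super_admin"
  else if best = 1 then "business_admin"
  else if best = 2 then "staff"
  else "user"

-- ===== PRECONDITION & SPEC =====
def Spec_determine_role_from_groups_py (groups : List String) (out : String) : Prop := out = determine_role_from_groups_py_alt groups
instance (groups : List String) (out : String) : Decidable (Spec_determine_role_from_groups_py groups out) := by unfold Spec_determine_role_from_groups_py; infer_instance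

-- ===== CLAIM (what is proved, stated in full; the proofs are below) =====
def Claim_equal_determine_role_from_groups_py : Prop := ∀ (groups : List String), Dom_determine_role_from_groups_py groups → Spec_determine_role_from_groups_py groups (determine_role_from_groups_py groups)

-- ===== LEMMAS AND PROOFS =====

lemma pv_fold_min (l : List String) (a b : Nat) :
    l.foldl (fun b g => min b (pvRank g)) (min a b)
      = min a (l.foldl (fun b g => min b (pvRank g)) b) := by
  induction l generalizing b with
  | nil => simp
  | cons g t ih =>
    simp only [List.foldl]
    rw [min_assoc, ih]

lemma pv_M_cons (g : String) (t : List String) :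
    (g :: t).foldl (fun b g => min b (pvRank g)) 4
      = min (pvRank g) (t.foldl (fun b g => min b (pvRank g)) 4) := by
  simp only [List.foldl]
  have h : min (4 : Nat) (pvRank g) = min (pvRank g) 4 := Nat.min_comm _ _
  rw [h, pv_fold_min]

lemma pv_rank_eq_zero (g : String) : pvRank g = 0 ↔ g = "sonicus-super-admin" := by
  unfold pvRank; split_ifs <;> simp_all

lemma pv_rank_le_one (g : String) :
    pvRank g ≤ 1 ↔ g = "sonicus-super-admin" ∨ g = "sonicus-business-admin" := by
  unfold pvRank; split_ifs <;> simp_all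

lemma pv_rank_le_two (g : String) :
    pvRank g ≤ 2 ↔ g = "sonicus-super-admin" ∨ g = "sonicus-business-admin" ∨ g = "sonicus-staff" := by
  unfold pvRank; split_ifs <;> simp_all

lemma pv_M_zero (l : List String) :
    l.foldl (fun b g => min b (pvRank g)) 4 = 0 ↔ "sonicus-super-admin" ∈ l := by
  induction l with
  | nil => simp
  | cons g t ih =>
    rw [pv_M_cons]
    have h := pv_rank_eq_zero g
    constructor
    · intro hm
      have hd : pvRank g = 0 ∨ t.foldl (fun b g => min b (pvRank g)) 4 = 0 := by omega
      rcases hd with h0 | h0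
      · exact List.mem_cons.mpr (Or.inl (h.mp h0).symm)
      · exact List.mem_cons.mpr (Or.inr (ih.mp h0))
    · intro hm
      rcases List.mem_cons.mp hm with h0 | h0
      · have : pvRank g = 0 := h.mpr h0.symm
        omega
      · have : t.foldl (fun b g => min b (pvRank g)) 4 = 0 := ih.mpr h0
        omega

lemma pv_M_le_one (l : List String) :
    l.foldl (fun b g => min b (pvRank g)) 4 ≤ 1
      ↔ "sonicus-super-admin" ∈ l ∨ "sonicus-business-admin" ∈ l := by
  induction l with
  | nil => simp
  | cons g t ih =>
    rw [pv_M_cons, min_le_iff, pv_rank_le_one, ih]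
    simp only [List.mem_cons]
    constructor
    · rintro ((h | h) | (h | h)) <;> tauto
    · rintro ((h | h) | (h | h)) <;> tauto

lemma pv_M_le_two (l : List String) :
    l.foldl (fun b g => min b (pvRank g)) 4 ≤ 2
      ↔ "sonicus-super-admin" ∈ l ∨ "sonicus-business-admin" ∈ l ∨ "sonicus-staff" ∈ l := by
  induction l with
  | nil => simp
  | cons g t ih =>
    rw [pv_M_cons, min_le_iff, pv_rank_le_two, ih]
    simp only [List.mem_cons]
    constructor
    · rintro ((h | h | h) | (h | h | h)) <;> tauto
    · rintro ((h | h) | (h | h) | (h | h)) <;> tauto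

-- ===== VERDICT (by name: the statement is the Claim_ definition above) =====
theorem determine_role_from_groups_py_spec : Claim_equal_determine_role_from_groups_py := by
  intro groups _
  unfold Spec_determine_role_from_groups_py determine_role_from_groups_py determine_role_from_groups_py_alt
  have h0 := pv_M_zero groups
  have h1 := pv_M_le_one groups
  have h2 := pv_M_le_two groups
  by_cases c1 : "sonicus-super-admin" ∈ groups <;>
  by_cases c2 : "sonicus-business-admin" ∈ groups <;>
  by_cases c3 : "sonicus-staff" ∈ groups <;>
  simp only [c1, c2, c3, if_true, if_false, or_true, or_false,
    iff_true, iff_false] at h0 h1 h2 ⊢ <;>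
  first
  | (have hv : groups.foldl (fun b g => min b (pvRank g)) 4 = 0 := by omega
     simp [hv])
  | (have hv : groups.foldl (fun b g => min b (pvRank g)) 4 = 1 := by omega
     simp [hv])
  | (have hv : groups.foldl (fun b g => min b (pvRank g)) 4 = 2 := by omega
     simp [hv])
  | (have e0 : groups.foldl (fun b g => min b (pvRank g)) 4 ≠ 0 := by omega
     have e1 : groups.foldl (fun b g => min b (pvRank g)) 4 ≠ 1 := by omega
     have e2 : groups.foldl (fun b g => min b (pvRank g)) 4 ≠ 2 := by omega
     by_cases c4 : "sonicus-user" ∈ groups <;> simp [c4, e0, e1, e2])
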